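-- pv_equiv track=rewrite | github.com/hounsouthohin/CodeAgent | agents/code_verify.py | _clean_code_response
-- ===== SOURCE A (Python) =====
-- def _clean_code_response(response: str) -> str:
--     """Nettoie la réponse pour extraire le code."""
--     # Enlever les markdown code blocks
--     response = response.replace("```python", "").replace("```", "").strip()
--
--     # Enlever les lignes de commentaires d'explication au début/fin
--     lines = response.split('\n')
--
--     # Trouver le premier import ou class/def
--     start_idx = 0
--     for i, line in enumerate(lines):
--         stripped = line.strip()
--         if stripped.startswith(('import ', 'from ', 'class ', 'def ', '@')):
--             start_idx = i
--             break
--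
--     # Garder à partir de là
--     cleaned_lines = lines[start_idx:]
--
--     return '\n'.join(cleaned_lines)
-- ===== SOURCE B (Python) =====
-- def _clean_code_response(response: str) -> str:
--     """Same cleaning, but a back-to-front fold over the lines: walk the lines in
--     reverse, growing the joined tail incrementally and overwriting the candidate
--     answer at every code line, so the final candidate is the suffix starting at
--     the first code line (no index arithmetic, no slicing)."""
--     response = response.replace("```python", "").replace("```", "").strip()
--     result = None
--     tail = None
--     for line in reversed(response.split('\n')):
--         tail = line if tail is None else line + '\n' + tail
--         if line.strip().startswith(('import ', 'from ', 'class ', 'def ', '@')):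
--             result = tail
--     return response if result is None else result
-- ===== Notes on version B (the rewrite author's own statement) =====
-- stated objective: alternative
-- what changed: A scans the lines front-to-back with enumerate for the first code-line index, slices the list there and rejoins; B folds over the lines back-to-front, growing the joined tail incrementally and overwriting the candidate answer at each code line, so no index, slice or final join is needed.
import Mathlib
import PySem

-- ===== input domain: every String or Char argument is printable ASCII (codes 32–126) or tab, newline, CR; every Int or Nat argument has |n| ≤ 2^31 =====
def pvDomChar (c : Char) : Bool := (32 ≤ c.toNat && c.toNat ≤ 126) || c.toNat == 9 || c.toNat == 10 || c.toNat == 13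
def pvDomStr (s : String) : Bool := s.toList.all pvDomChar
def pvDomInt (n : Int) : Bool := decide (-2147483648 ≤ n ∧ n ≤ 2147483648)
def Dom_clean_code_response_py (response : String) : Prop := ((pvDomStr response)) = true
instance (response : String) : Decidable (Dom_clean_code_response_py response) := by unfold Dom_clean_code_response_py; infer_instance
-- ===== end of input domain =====

-- B replaces A's enumerate-scan / index / slice / '\n'.join pipeline by a back-to-front fold
-- over the lines that grows the joined tail incrementally and overwrites the answer at each
-- code line (alternative decomposition; not claimed faster).


-- ===== PORT A =====
-- stripped.startswith(('import ', 'from ', 'class ', 'def ', '@'))  (test shared verbatim by both Pythons)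
def pvPred (line : List Char) : Bool :=
  let st := PySem.Chars.strip line
  PySem.Chars.startswith st "import ".toList || PySem.Chars.startswith st "from ".toList ||
  PySem.Chars.startswith st "class ".toList || PySem.Chars.startswith st "def ".toList ||
  PySem.Chars.startswith st "@".toList

-- the for/enumerate loop with break: first index whose line matches (none = loop fell through, start_idx stays 0)
def pvFindIdxA : List (List Char) → Nat → Option Nat
  | [], _ => none
  | l :: ls, i => if pvPred l then some i else pvFindIdxA ls (i + 1)

def clean_code_response_py (response : String) : String :=
  let s := PySem.Str.strip (PySem.Str.replace (PySem.Str.replace response "```python" "") "```" "")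
  let lines := PySem.Chars.splitOn s.toList "\n".toList
  let start_idx := (pvFindIdxA lines 0).getD 0
  String.ofList (PySem.Chars.join "\n".toList (lines.drop start_idx))

-- ===== PORT B =====
-- one iteration of Source B's loop body: state = (result, tail), both Optional
def pvStepB (line : List Char) (st : Option (List Char) × Option (List Char)) :
    Option (List Char) × Option (List Char) :=
  let tail : List Char := match st.2 with
    | none => line
    | some t => line ++ '\n' :: t
  (if pvPred line then some tail else st.1, some tail)

def clean_code_response_py_alt (response : String) : String :=
  let s := PySem.Str.strip (PySem.Str.replace (PySem.Str.replace response "```python" "") "```" "")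
  let lines := PySem.Chars.splitOn s.toList "\n".toList
  let st := lines.reverse.foldl (fun st line => pvStepB line st) (none, none)
  match st.1 with
  | some r => String.ofList r
  | none => s

-- ===== PRECONDITION & SPEC =====
def Spec_clean_code_response_py (response : String) (out : String) : Prop := out = clean_code_response_py_alt response
instance (response : String) (out : String) : Decidable (Spec_clean_code_response_py response out) := by unfold Spec_clean_code_response_py; infer_instance

-- ===== CLAIM (what is proved, stated in full; the proofs are below) =====
def Claim_equal_clean_code_response_py : Prop := ∀ (response : String), Dom_clean_code_response_py response → Spec_clean_code_response_py response (clean_code_response_py response)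

-- ===== LEMMAS AND PROOFS =====

def pvNotNL (c : Char) : Bool := c != '\n'

-- reference single-char split, used to characterise PySem.Chars.splitOn on "\n"
def mySplit (l : List Char) : List (List Char) :=
  match _h : l.dropWhile pvNotNL with
  | [] => [l]
  | _ :: rest => l.takeWhile pvNotNL :: mySplit rest
termination_by l.length
decreasing_by
  have h1 : (l.dropWhile pvNotNL).length ≤ l.length := l.length_dropWhile_le _
  rw [_h] at h1; simp at h1; omega

theorem mySplit_eq_nil_case (l : List Char) (h : l.dropWhile pvNotNL = []) :
    mySplit l = [l] := by
  rw [mySplit.eq_def, h]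

theorem mySplit_eq_cons_case (l : List Char) (a : Char) (rest : List Char)
    (h : l.dropWhile pvNotNL = a :: rest) :
    mySplit l = l.takeWhile pvNotNL :: mySplit rest := by
  rw [mySplit.eq_def, h]

-- strong-induction principle following the newline structure
theorem pvNL_induction (P : List Char → Prop)
    (h1 : ∀ l, l.dropWhile pvNotNL = [] → P l)
    (h2 : ∀ l a rest, l.dropWhile pvNotNL = a :: rest → P rest → P l) :
    ∀ l, P l := by
  intro l
  induction hn : l.length using Nat.strong_induction_on generalizing l with
  | _ n ih =>
    rcases h : l.dropWhile pvNotNL with _ | ⟨a, rest⟩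
    · exact h1 l h
    · refine h2 l a rest h (ih rest.length ?_ rest rfl)
      have hle : (l.dropWhile pvNotNL).length ≤ l.length := l.length_dropWhile_le _
      rw [h] at hle; simp at hle; omega

theorem dropWhile_head_nl (l rest : List Char) (a : Char)
    (h : l.dropWhile pvNotNL = a :: rest) : a = '\n' := by
  induction l with
  | nil => simp at h
  | cons c cs ih =>
    by_cases hc : c = '\n'
    · subst hc
      rw [List.dropWhile_cons] at h
      simp [pvNotNL] at h
      exact h.1.symm
    · rw [List.dropWhile_cons] at h
      simp only [pvNotNL, bne_iff_ne, ne_eq, hc, not_false_iff, if_true] at h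
      exact ih h

theorem mySplit_decompose (l rest : List Char) (a : Char)
    (h : l.dropWhile pvNotNL = a :: rest) :
    l = l.takeWhile pvNotNL ++ '\n' :: rest := by
  have ha := dropWhile_head_nl l rest a h
  subst ha
  conv_lhs => rw [← List.takeWhile_append_dropWhile (p := pvNotNL) (l := l)]
  rw [h]

-- splitOn.go with enough fuel computes mySplit (pending field `cur` and accumulator folded in)
theorem splitOn_go_spec (l : List Char) : ∀ (fuel : Nat) (cur : List Char) (acc : List (List Char)),
    l.length ≤ fuel →
    PySem.Chars.splitOn.go ['\n'] fuel l cur acc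
      = acc.reverse ++ List.modifyHead (cur.reverse ++ ·) (mySplit l) := by
  induction l with
  | nil =>
    intro fuel cur acc _
    have hnil : mySplit [] = [[]] := mySplit_eq_nil_case [] (by simp)
    cases fuel <;> simp [PySem.Chars.splitOn.go, hnil]
  | cons c cs ih =>
    intro fuel cur acc hf
    cases fuel with
    | zero => simp at hf
    | succ f =>
      have hcs : cs.length ≤ f := by simp at hf; omega
      by_cases hc : c = '\n'
      · subst hc
        have hpre : (['\n']).isPrefixOf ('\n' :: cs) = true := by
          simp [List.isPrefixOf]
        rw [PySem.Chars.splitOn.go]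
        simp only [hpre, if_pos]
        rw [show List.drop (['\n'] : List Char).length ('\n' :: cs) = cs by simp]
        rw [ih f [] (cur.reverse :: acc) hcs]
        have hsplit : mySplit ('\n' :: cs) = [] :: mySplit cs := by
          have hdw : ('\n' :: cs).dropWhile pvNotNL = '\n' :: cs := by
            rw [List.dropWhile_cons]; simp [pvNotNL]
          rw [mySplit_eq_cons_case _ '\n' cs hdw]
          rw [List.takeWhile_cons]; simp [pvNotNL]
        rw [hsplit]
        rcases mySplit cs with _ | ⟨m, ms⟩ <;> simp
      · have hpre : (['\n']).isPrefixOf (c :: cs) = false := by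
          simp [List.isPrefixOf]
          exact fun hh => hc hh.symm
        rw [PySem.Chars.splitOn.go]
        rw [if_neg (by rw [hpre]; exact Bool.false_ne_true)]
        rw [ih f (c :: cur) acc hcs]
        have hdw : (c :: cs).dropWhile pvNotNL = cs.dropWhile pvNotNL := by
          rw [List.dropWhile_cons]; simp [pvNotNL, hc]
        have htw : (c :: cs).takeWhile pvNotNL = c :: cs.takeWhile pvNotNL := by
          rw [List.takeWhile_cons]; simp [pvNotNL, hc]
        rcases hd : cs.dropWhile pvNotNL with _ | ⟨a, rest⟩
        · rw [mySplit_eq_nil_case _ (hdw.trans hd), mySplit_eq_nil_case _ hd]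
          simp
        · rw [mySplit_eq_cons_case _ a rest (hdw.trans hd), mySplit_eq_cons_case _ a rest hd]
          rw [htw]
          simp

theorem splitOn_eq_mySplit (l : List Char) :
    PySem.Chars.splitOn l ['\n'] = mySplit l := by
  rw [PySem.Chars.splitOn, splitOn_go_spec l (l.length + 1) [] [] (by omega)]
  rcases mySplit l with _ | ⟨m, ms⟩ <;> simp

theorem mySplit_ne_nil (l : List Char) : mySplit l ≠ [] := by
  rcases h : l.dropWhile pvNotNL with _ | ⟨a, rest⟩
  · rw [mySplit_eq_nil_case _ h]; simp
  · rw [mySplit_eq_cons_case _ a rest h]; simp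

theorem join_cons_cons (l m : List Char) (ms : List (List Char)) :
    PySem.Chars.join ['\n'] (l :: m :: ms) = l ++ '\n' :: PySem.Chars.join ['\n'] (m :: ms) := by
  simp [PySem.Chars.join, List.intercalate, List.intersperse]

theorem join_mySplit (l : List Char) : PySem.Chars.join ['\n'] (mySplit l) = l := by
  induction l using pvNL_induction with
  | h1 l h =>
    rw [mySplit_eq_nil_case _ h]
    simp [PySem.Chars.join, List.intercalate]
  | h2 l a rest h ih =>
    rw [mySplit_eq_cons_case _ a rest h]
    have hne := mySplit_ne_nil rest
    rcases hm : mySplit rest with _ | ⟨m, ms⟩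
    · exact absurd hm hne
    · rw [join_cons_cons, ← hm, ih, ← mySplit_decompose l rest a h]

theorem pvFindIdxA_shift (ls : List (List Char)) (i : Nat) :
    pvFindIdxA ls i = (pvFindIdxA ls 0).map (· + i) := by
  induction ls generalizing i with
  | nil => simp [pvFindIdxA]
  | cons l ls ih =>
    by_cases hp : pvPred l
    · simp [pvFindIdxA, hp]
    · rw [pvFindIdxA, pvFindIdxA, if_neg (by simp [hp]), if_neg (by simp [hp]), ih (i + 1), ih 1]
      cases pvFindIdxA ls 0 with
      | none => simp
      | some j => simp; omega

-- the heart: B's back-to-front fold computes (suffix from the first matching line, join of all lines)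
theorem foldB_spec (ls : List (List Char)) (hne : ls ≠ []) :
    ls.reverse.foldl (fun st line => pvStepB line st) (none, none)
      = ((pvFindIdxA ls 0).map (fun i => PySem.Chars.join ['\n'] (ls.drop i)),
         some (PySem.Chars.join ['\n'] ls)) := by
  rw [List.foldl_reverse]
  induction ls with
  | nil => exact absurd rfl hne
  | cons l rest ih =>
    rcases rest with _ | ⟨m, ms⟩
    · simp only [List.foldr]
      by_cases hp : pvPred l <;>
        simp [pvStepB, pvFindIdxA, hp, PySem.Chars.join, List.intercalate]
    · rw [List.foldr_cons, ih (by simp)]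
      have hsh : pvFindIdxA (l :: m :: ms) 0
          = if pvPred l then some 0 else (pvFindIdxA (m :: ms) 0).map (· + 1) := by
        rw [pvFindIdxA]
        split
        · rfl
        · exact pvFindIdxA_shift (m :: ms) 1
      rw [hsh, join_cons_cons]
      by_cases hp : pvPred l
      · simp [pvStepB, hp, join_cons_cons]
      · cases pvFindIdxA (m :: ms) 0 with
        | none => simp [pvStepB, hp]
        | some j => simp [pvStepB, hp, List.drop_succ_cons]

-- ===== VERDICT (by name: the statement is the Claim_ definition above) =====
theorem clean_code_response_py_spec : Claim_equal_clean_code_response_py := by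
  intro response _
  unfold Spec_clean_code_response_py clean_code_response_py clean_code_response_py_alt
  set s := PySem.Str.strip (PySem.Str.replace (PySem.Str.replace response "```python" "") "```" "") with hs
  simp only [show ("\n".toList : List Char) = ['\n'] from rfl]
  rw [splitOn_eq_mySplit, foldB_spec _ (mySplit_ne_nil _)]
  rcases hf : pvFindIdxA (mySplit s.toList) 0 with _ | i
  · simp only [Option.map_none, Option.getD_none, List.drop_zero, join_mySplit]
    rw [hs]
    simp [PySem.Str.strip]
  · simp
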